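-- pv_equiv track=rewrite | github.com/Alope489/GESDB_Pipeline | data_insert.py | rule_for_path
-- ===== SOURCE A (Python) =====
-- from typing import Any, Dict, List, Tuple, Iterable, Optional
--
-- FIELD_RULES: Dict[str, Dict[str, Any]] = {
--     "Latitude":  {"type": "float", "desc": "Geographic coordinate latitude in decimal degrees."},
--     "Longitude": {"type": "float", "desc": "Geographic coordinate longitude in decimal degrees."},
--     "County":    {"type": "string", "desc": "County or shire of project site."},
--     "State/Province/Territory": {"type": "string", "desc": "State, province, or territory of the site."},
--     "ISO/RTO":   {"type": "string", "desc": "Electricity market ISO/RTO serving the interconnection."},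
--     "Commissioned Date": {"type": "date", "desc": "First commercial operation date (YYYY-MM-DD or YYYY)."},
--     "Announced Date":    {"type": "date", "desc": "Initial public announcement date (YYYY-MM-DD or YYYY)."},
--     "Constructed Date":  {"type": "date", "desc": "Construction start or substantial completion date."},
--     "Paired Grid Resources": {"type": "string", "desc": "Primary paired resource (e.g., Solar, Wind, Hydro)."},
--     # Example nested rule:
--     "Subsystems[].Storage Device.Round-trip Efficiency": {
--         "type": "percent", "desc": "Battery round-trip efficiency (%)"
--     },
--     "Subsystems[].Power Conversion System.Nominal AC Voltage": {
--         "type": "string", "desc": "PCS nominal AC voltage (kV or V, specify units)."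
--     },
--     # Applications buckets (if empty list -> missing)
--     "Applications.Bulk Energy Services (General Energy Applications)": {"type": "list", "desc": "Bulk energy services provided."},
--     "Applications.Ancillary Services": {"type": "list", "desc": "Ancillary services provided."},
--     "Applications.Transmission Infrastructure Services": {"type": "list", "desc": "Transmission services provided."},
--     "Applications.Distribution Infrastructure Services": {"type": "list", "desc": "Distribution services provided."},
--     "Applications.Customer Energy Management Services (End-User Services)": {"type": "list", "desc": "End-user energy management services."},
--     "Applications.Others": {"type": "list", "desc": "Other services provided."},
-- }
--
-- def rule_for_path(path: str) -> Optional[Dict[str, Any]]: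
--     candidates = []
--     for rule_path, rule in FIELD_RULES.items():
--         rp_parts = rule_path.replace("[]", "[*]").split(".")
--         p_parts  = path.split(".")
--         ok = True
--         for rp, pp in zip(rp_parts, p_parts):
--             if "[*]" in rp:
--                 # allow any [index]
--                 rp_clean = rp.replace("[*]", "")
--                 pp_clean = pp.split("[")[0]
--                 if rp_clean != pp_clean:
--                     ok = False; break
--             else:
--                 if rp != pp:
--                     ok = False; break
--         if ok and len(rp_parts) == len(p_parts):
--             candidates.append((rule_path, rule))
--     if not candidates:
--         return None
--     # Most specific wins -> longer rule path
--     candidates.sort(key=lambda x: len(x[0]), reverse=True)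
--     return candidates[0][1]
-- ===== SOURCE B (Python) =====
-- from typing import Any, Dict, Optional
--
-- FIELD_RULES: Dict[str, Dict[str, Any]] = {
--     "Latitude":  {"type": "float", "desc": "Geographic coordinate latitude in decimal degrees."},
--     "Longitude": {"type": "float", "desc": "Geographic coordinate longitude in decimal degrees."},
--     "County":    {"type": "string", "desc": "County or shire of project site."},
--     "State/Province/Territory": {"type": "string", "desc": "State, province, or territory of the site."},
--     "ISO/RTO":   {"type": "string", "desc": "Electricity market ISO/RTO serving the interconnection."},
--     "Commissioned Date": {"type": "date", "desc": "First commercial operation date (YYYY-MM-DD or YYYY)."},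
--     "Announced Date":    {"type": "date", "desc": "Initial public announcement date (YYYY-MM-DD or YYYY)."},
--     "Constructed Date":  {"type": "date", "desc": "Construction start or substantial completion date."},
--     "Paired Grid Resources": {"type": "string", "desc": "Primary paired resource (e.g., Solar, Wind, Hydro)."},
--     "Subsystems[].Storage Device.Round-trip Efficiency": {
--         "type": "percent", "desc": "Battery round-trip efficiency (%)"
--     },
--     "Subsystems[].Power Conversion System.Nominal AC Voltage": {
--         "type": "string", "desc": "PCS nominal AC voltage (kV or V, specify units)."
--     },
--     "Applications.Bulk Energy Services (General Energy Applications)": {"type": "list", "desc": "Bulk energy services provided."},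
--     "Applications.Ancillary Services": {"type": "list", "desc": "Ancillary services provided."},
--     "Applications.Transmission Infrastructure Services": {"type": "list", "desc": "Transmission services provided."},
--     "Applications.Distribution Infrastructure Services": {"type": "list", "desc": "Distribution services provided."},
--     "Applications.Customer Energy Management Services (End-User Services)": {"type": "list", "desc": "End-user energy management services."},
--     "Applications.Others": {"type": "list", "desc": "Other services provided."},
-- }
--
--
-- def _seg_match(rp: str, pp: str) -> bool:
--     if "[*]" in rp:
--         return rp.replace("[*]", "") == pp.split("[")[0]
--     return rp == pp
--
--
-- def rule_for_path(path: str) -> Optional[Dict[str, Any]]: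
--     # Single pass: thread a running best (longest matching rule path) instead of
--     # collecting candidates and sorting; strict '>' keeps the first of equal-length ties.
--     p_parts = path.split(".")
--     best_rule, best_len = None, -1
--     for rule_path, rule in FIELD_RULES.items():
--         rp_parts = rule_path.replace("[]", "[*]").split(".")
--         if len(rp_parts) == len(p_parts) and all(
--             _seg_match(rp, pp) for rp, pp in zip(rp_parts, p_parts)
--         ):
--             if len(rule_path) > best_len:
--                 best_rule, best_len = rule, len(rule_path)
--     return best_rule
-- ===== Notes on version B (the rewrite author's own statement) =====
-- stated objective: simpler
-- what changed: Replaces A's collect-all-candidates list plus stable descending sort and head-take with a single pass that threads a running best (best_rule, best_len), updating only on a strictly longer rule path so the first of equal-length ties is kept exactly as A's stable sort does.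
import Mathlib
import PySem

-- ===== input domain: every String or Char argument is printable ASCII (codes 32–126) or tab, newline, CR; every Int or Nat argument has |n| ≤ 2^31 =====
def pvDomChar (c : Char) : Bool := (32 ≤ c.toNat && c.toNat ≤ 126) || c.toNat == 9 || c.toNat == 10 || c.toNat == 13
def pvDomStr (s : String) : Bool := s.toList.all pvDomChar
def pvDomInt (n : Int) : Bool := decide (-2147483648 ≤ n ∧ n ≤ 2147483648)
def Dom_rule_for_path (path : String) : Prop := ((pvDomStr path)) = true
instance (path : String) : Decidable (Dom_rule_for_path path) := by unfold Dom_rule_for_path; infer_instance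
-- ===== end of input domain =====

-- B replaces A's candidates-list + stable descending sort with a one-pass running best
-- (strict '>' on rule-path length keeps the first of equal-length ties); objective: simpler.

-- shared module constant FIELD_RULES (dict of dicts → assoc list of assoc lists)
def pvFIELD_RULES : List (String × List (String × String)) := [
  ("Latitude", [("type", "float"), ("desc", "Geographic coordinate latitude in decimal degrees.")]),
  ("Longitude", [("type", "float"), ("desc", "Geographic coordinate longitude in decimal degrees.")]),
  ("County", [("type", "string"), ("desc", "County or shire of project site.")]),
  ("State/Province/Territory", [("type", "string"), ("desc", "State, province, or territory of the site.")]),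
  ("ISO/RTO", [("type", "string"), ("desc", "Electricity market ISO/RTO serving the interconnection.")]),
  ("Commissioned Date", [("type", "date"), ("desc", "First commercial operation date (YYYY-MM-DD or YYYY).")]),
  ("Announced Date", [("type", "date"), ("desc", "Initial public announcement date (YYYY-MM-DD or YYYY).")]),
  ("Constructed Date", [("type", "date"), ("desc", "Construction start or substantial completion date.")]),
  ("Paired Grid Resources", [("type", "string"), ("desc", "Primary paired resource (e.g., Solar, Wind, Hydro).")]),
  ("Subsystems[].Storage Device.Round-trip Efficiency", [("type", "percent"), ("desc", "Battery round-trip efficiency (%)")]),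
  ("Subsystems[].Power Conversion System.Nominal AC Voltage", [("type", "string"), ("desc", "PCS nominal AC voltage (kV or V, specify units).")]),
  ("Applications.Bulk Energy Services (General Energy Applications)", [("type", "list"), ("desc", "Bulk energy services provided.")]),
  ("Applications.Ancillary Services", [("type", "list"), ("desc", "Ancillary services provided.")]),
  ("Applications.Transmission Infrastructure Services", [("type", "list"), ("desc", "Transmission services provided.")]),
  ("Applications.Distribution Infrastructure Services", [("type", "list"), ("desc", "Distribution services provided.")]),
  ("Applications.Customer Energy Management Services (End-User Services)", [("type", "list"), ("desc", "End-user energy management services.")]),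
  ("Applications.Others", [("type", "list"), ("desc", "Other services provided.")])
]

-- ===== PORT A =====
-- A's inner 'for rp, pp in zip(...)' with break; pp.split("[")[0] always exists (split is
-- never empty), so the .getD [] / pyGetD defaults are never taken ("." and "[" are ≠ "").
def pvOkLoop : List (String × String) → Bool
  | [] => true
  | (rp, pp) :: rest =>
    if PySem.Str.isIn "[*]" rp then
      if (PySem.Str.replace rp "[*]" "") ≠ (PySem.List.pyGetD ((PySem.Str.split? pp "[").getD []) 0 "") then
        false
      else pvOkLoop rest
    else
      if rp ≠ pp then false else pvOkLoop rest

def rule_for_path (path : String) : Option (List (String × String)) :=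
  let candidates := pvFIELD_RULES.foldl (fun acc pr =>
    let rp_parts := (PySem.Str.split? (PySem.Str.replace pr.1 "[]" "[*]") ".").getD []
    let p_parts := (PySem.Str.split? path ".").getD []
    let ok := pvOkLoop (rp_parts.zip p_parts)
    if ok && (rp_parts.length == p_parts.length) then acc ++ [pr] else acc) []
  if candidates.isEmpty then none
  else some (((PySem.List.sorted candidates (fun x => PySem.Str.len x.1) true).headD ("", [])).2)

-- ===== PORT B =====
def pvSegMatch (rp pp : String) : Bool :=
  if PySem.Str.isIn "[*]" rp then
    PySem.Str.replace rp "[*]" "" == PySem.List.pyGetD ((PySem.Str.split? pp "[").getD []) 0 ""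
  else rp == pp

def rule_for_path_alt (path : String) : Option (List (String × String)) :=
  let p_parts := (PySem.Str.split? path ".").getD []
  (pvFIELD_RULES.foldl (fun (st : Option (List (String × String)) × Int) pr =>
    let rp_parts := (PySem.Str.split? (PySem.Str.replace pr.1 "[]" "[*]") ".").getD []
    if rp_parts.length == p_parts.length
        && (rp_parts.zip p_parts).all (fun q => pvSegMatch q.1 q.2) then
      if PySem.Str.len pr.1 > st.2 then (some pr.2, PySem.Str.len pr.1) else st
    else st) (none, -1)).1

-- ===== PRECONDITION & SPEC =====
def Spec_rule_for_path (path : String) (out : Option (List (String × String))) : Prop := out = rule_for_path_alt path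
instance (path : String) (out : Option (List (String × String))) : Decidable (Spec_rule_for_path path out) := by unfold Spec_rule_for_path; infer_instance

-- ===== CLAIM (what is proved, stated in full; the proofs are below) =====
def Claim_equal_rule_for_path : Prop := ∀ (path : String), Dom_rule_for_path path → Spec_rule_for_path path (rule_for_path path)

-- ===== LEMMAS AND PROOFS =====

-- the shared matching condition, as a named predicate (proof helper)
def pvCond (path : String) (pr : String × List (String × String)) : Bool :=
  let rp_parts := (PySem.Str.split? (PySem.Str.replace pr.1 "[]" "[*]") ".").getD []
  let p_parts := (PySem.Str.split? path ".").getD []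
  rp_parts.length == p_parts.length && (rp_parts.zip p_parts).all (fun q => pvSegMatch q.1 q.2)

theorem pvOkLoop_eq_all (l : List (String × String)) :
    pvOkLoop l = l.all (fun q => pvSegMatch q.1 q.2) := by
  induction l with
  | nil => rfl
  | cons q rest ih =>
    obtain ⟨rp, pp⟩ := q
    simp only [pvOkLoop, pvSegMatch, List.all_cons, ih]
    split_ifs with h1 h2 h3 <;> simp_all

-- A's candidates list is the filter of FIELD_RULES by pvCond
theorem pvA_candidates (path : String) :
    pvFIELD_RULES.foldl (fun acc pr =>
      let rp_parts := (PySem.Str.split? (PySem.Str.replace pr.1 "[]" "[*]") ".").getD []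
      let p_parts := (PySem.Str.split? path ".").getD []
      let ok := pvOkLoop (rp_parts.zip p_parts)
      if ok && (rp_parts.length == p_parts.length) then acc ++ [pr] else acc) [] =
    pvFIELD_RULES.filter (pvCond path) := by
  have hfun : (fun (acc : List (String × List (String × String))) pr =>
      let rp_parts := (PySem.Str.split? (PySem.Str.replace pr.1 "[]" "[*]") ".").getD []
      let p_parts := (PySem.Str.split? path ".").getD []
      let ok := pvOkLoop (rp_parts.zip p_parts)
      if ok && (rp_parts.length == p_parts.length) then acc ++ [pr] else acc) =
      (fun acc pr => if pvCond path pr then acc ++ [id pr] else acc) := by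
    funext acc pr
    simp only [pvCond, pvOkLoop_eq_all, id, Bool.and_comm]
  rw [hfun, PySem.List.foldl_append_if (pvCond path) id pvFIELD_RULES []]
  simp

-- head of the stable reverse sort versus Python max (first maximal element)
theorem pvInsertBy_head {α : Type} (key : α → Int) (x : α) (acc : List α) :
    (PySem.List.insertBy (fun a b => decide (key b < key a)) x acc).head? =
      (match acc.head? with
        | none => some x
        | some m => if key m < key x then some x else some m) := by
  cases acc with
  | nil => rfl
  | cons y ys =>
    simp only [PySem.List.insertBy, List.head?_cons]
    split_ifs with h <;> simp_all

theorem pvFoldl_insertBy_head {α : Type} (key : α → Int) (C : List α) (acc : List α) :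
    (C.foldl (fun acc x => PySem.List.insertBy (fun a b => decide (key b < key a)) x acc) acc).head? =
    C.foldl (fun o x =>
      match o with
      | none => some x
      | some m => if key m < key x then some x else some m) acc.head? := by
  induction C generalizing acc with
  | nil => rfl
  | cons x rest ih =>
    simp only [List.foldl_cons, ih, pvInsertBy_head]

theorem pvSorted_rev_head {α : Type} (key : α → Int) (C : List α) :
    (PySem.List.sorted C key true).head? = PySem.List.max? C key := by
  rw [PySem.List.sorted_rev_eq_foldl_insertBy, PySem.List.max?]
  exact pvFoldl_insertBy_head key C []

-- the running-best fold computes (first maximal element).2, over nonneg keys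
theorem pvBest_aux {α R : Type} (key : α → Int) (val : α → R)
    (hkey : ∀ x : α, 0 ≤ key x) (C : List α) (o : Option α) :
    (C.foldl (fun st x => if key x > st.2 then (some (val x), key x) else st)
      (o.map val, o.elim (-1) key)) =
    (((C.foldl (fun o x =>
        match o with
        | none => some x
        | some m => if key m < key x then some x else some m) o).map val),
      ((C.foldl (fun o x =>
        match o with
        | none => some x
        | some m => if key m < key x then some x else some m) o).elim (-1) key)) := by
  induction C generalizing o with
  | nil => rfl
  | cons x rest ih =>
    simp only [List.foldl_cons]
    cases o with
    | none =>
      have hx : key x > (-1 : Int) := by have := hkey x; omega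
      simpa [hx] using ih (some x)
    | some m =>
      by_cases h : key m < key x
      · simpa [h] using ih (some x)
      · have h' : ¬ key x > key m := h
        simpa [h, h'] using ih (some m)

theorem pvBest_eq_max {α R : Type} (key : α → Int) (val : α → R)
    (hkey : ∀ x : α, 0 ≤ key x) (C : List α) :
    (C.foldl (fun st x => if key x > st.2 then (some (val x), key x) else st)
      (none, -1)).1 = (PySem.List.max? C key).map val := by
  have := pvBest_aux key val hkey C none
  simp only [Option.map_none, Option.elim_none] at this
  rw [this]
  rfl

-- ===== VERDICT (by name: the statement is the Claim_ definition above) =====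
theorem rule_for_path_spec : Claim_equal_rule_for_path := by
  intro path _
  simp only [Spec_rule_for_path, rule_for_path, rule_for_path_alt]
  rw [pvA_candidates path]
  have hB : (fun (st : Option (List (String × String)) × Int) pr =>
      let rp_parts := (PySem.Str.split? (PySem.Str.replace (Prod.fst pr) "[]" "[*]") ".").getD []
      if rp_parts.length == ((PySem.Str.split? path ".").getD []).length
          && (rp_parts.zip ((PySem.Str.split? path ".").getD [])).all (fun q => pvSegMatch q.1 q.2) then
        if PySem.Str.len pr.1 > st.2 then (some pr.2, PySem.Str.len pr.1) else st
      else st) =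
      (fun st pr => if pvCond path pr then
        (if PySem.Str.len pr.1 > st.2 then (some pr.2, PySem.Str.len pr.1) else st) else st) := rfl
  rw [hB, ← List.foldl_filter,
    pvBest_eq_max (fun pr => PySem.Str.len pr.1) (fun pr => pr.2)
      (fun pr => by simp only [PySem.Str.len_eq]; positivity)
      (List.filter (pvCond path) pvFIELD_RULES)]
  cases hC : pvFIELD_RULES.filter (pvCond path) with
  | nil => simp
  | cons c cs =>
    have hne : (c :: cs : List (String × List (String × String))) ≠ [] := by simp
    obtain ⟨m, hm⟩ : ∃ m, PySem.List.max? (c :: cs) (fun pr => PySem.Str.len pr.1) = some m := by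
      cases h : PySem.List.max? (c :: cs) (fun pr => PySem.Str.len pr.1) with
      | none => exact absurd ((PySem.List.max?_eq_none_iff _ _).1 h) hne
      | some m => exact ⟨m, rfl⟩
    have hhead : (PySem.List.sorted (c :: cs) (fun pr => PySem.Str.len pr.1) true).head? = some m := by
      rw [pvSorted_rev_head]; exact hm
    rw [List.headD_eq_head?, hhead, hm]
    simp
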